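-- pv_equiv track=rewrite | github.com/WENYULIANG123/PersonalQuery | stark/code/analysis/review_style/test_batch_results.py | _is_genuine_spelling_error
-- ===== SOURCE A (Python) =====
-- def _is_genuine_spelling_error(original: str, corrected: str, reason: str) -> bool:
--     """Validate if this is a genuine spelling error."""
--     if original == corrected:
--         return False
--
--     original_chars = original.lower()
--     corrected_chars = corrected.lower()
--
--     if abs(len(original_chars) - len(corrected_chars)) > 3:
--         return False
--
--     if original_chars + 's' == corrected_chars or corrected_chars + 's' == original_chars:
--         return False
--
--     verb_suffixes = ['s', 'ed', 'ing', 'er', 'est']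
--     for suffix in verb_suffixes:
--         if original_chars + suffix == corrected_chars or corrected_chars + suffix == original_chars:
--             return False
--
--     return True
-- ===== SOURCE B (Python) =====
-- def _is_genuine_spelling_error(original: str, corrected: str, reason: str) -> bool:
--     """Validate if this is a genuine spelling error."""
--     if original == corrected:
--         return False
--     a = original.lower()
--     b = corrected.lower()
--     if abs(len(a) - len(b)) > 3:
--         return False
--     # single left-to-right scan: advance past the common prefix of a and b
--     i = 0
--     n = min(len(a), len(b))
--     while i < n and a[i] == b[i]:
--         i += 1
--     if i == len(a):
--         rest = b[i:]
--     elif i == len(b):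
--         rest = a[i:]
--     else:
--         return True  # both words continue with different letters: a genuine respelling
--     return rest not in ('s', 'ed', 'ing', 'er', 'est')
-- ===== Notes on version B (the rewrite author's own statement) =====
-- stated objective: alternative
-- what changed: A's redundant '+s' test plus a loop over five candidate suffixes, each doing two full concatenation-equality comparisons, is replaced by one character-by-character scan that strips the common prefix of the two lowered words and then classifies the single trailing remainder of the longer word.
import Mathlib
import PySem

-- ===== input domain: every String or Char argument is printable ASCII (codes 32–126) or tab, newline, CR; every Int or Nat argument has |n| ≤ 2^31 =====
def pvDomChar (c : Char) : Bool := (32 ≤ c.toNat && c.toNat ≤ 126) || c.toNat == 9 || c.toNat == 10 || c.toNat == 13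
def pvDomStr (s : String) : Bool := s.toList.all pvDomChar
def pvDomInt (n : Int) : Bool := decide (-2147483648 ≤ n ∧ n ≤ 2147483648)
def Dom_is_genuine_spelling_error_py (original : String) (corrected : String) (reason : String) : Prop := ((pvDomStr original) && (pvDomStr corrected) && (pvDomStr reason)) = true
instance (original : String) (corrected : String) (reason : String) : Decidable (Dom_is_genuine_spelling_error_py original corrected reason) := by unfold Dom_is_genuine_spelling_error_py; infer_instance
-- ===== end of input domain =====

-- B replaces A's redundant '+s' test and five-suffix concatenation loop by one
-- character-by-character scan stripping the common prefix and classifying the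
-- remainder of the longer word (objective: a genuinely different traversal).

-- ===== PORT A =====
-- the for-loop over verb_suffixes with early 'return False'
def pvLoopA (oc cc : List Char) : List (List Char) → Bool
  | [] => true
  | suf :: rest =>
      if oc ++ suf == cc || cc ++ suf == oc then false else pvLoopA oc cc rest

def is_genuine_spelling_error_py (original : String) (corrected : String) (reason : String) : Bool :=
  if original == corrected then false
  else
    let oc := PySem.Chars.lower original.toList
    let cc := PySem.Chars.lower corrected.toList
    if 3 < ((oc.length : Int) - (cc.length : Int)).natAbs then false
    else if oc ++ ['s'] == cc || cc ++ ['s'] == oc then false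
    else pvLoopA oc cc [['s'], ['e','d'], ['i','n','g'], ['e','r'], ['e','s','t']]

-- ===== PORT B =====
-- Source B's while loop: advance past the common prefix; the three-way i==len(a) /
-- i==len(b) / else split is the three match arms (some remainder-of-b /
-- some remainder-of-a / none, where none means 'return True')
def pvCommonRest : List Char → List Char → Option (List Char)
  | [], ys => some ys
  | x :: xs, [] => some (x :: xs)
  | x :: xs, y :: ys => if x = y then pvCommonRest xs ys else none

def is_genuine_spelling_error_py_alt (original : String) (corrected : String) (reason : String) : Bool :=
  if original == corrected then false
  else
    let a := PySem.Chars.lower original.toList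
    let b := PySem.Chars.lower corrected.toList
    if 3 < ((a.length : Int) - (b.length : Int)).natAbs then false
    else
      match pvCommonRest a b with
      | none => true
      | some rest => !([['s'], ['e','d'], ['i','n','g'], ['e','r'], ['e','s','t']] : List (List Char)).contains rest

-- ===== PRECONDITION & SPEC =====
def Spec_is_genuine_spelling_error_py (original : String) (corrected : String) (reason : String) (out : Bool) : Prop := out = is_genuine_spelling_error_py_alt original corrected reason
instance (original : String) (corrected : String) (reason : String) (out : Bool) : Decidable (Spec_is_genuine_spelling_error_py original corrected reason out) := by unfold Spec_is_genuine_spelling_error_py; infer_instance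

-- ===== CLAIM (what is proved, stated in full; the proofs are below) =====
def Claim_equal_is_genuine_spelling_error_py : Prop := ∀ (original : String) (corrected : String) (reason : String), Dom_is_genuine_spelling_error_py original corrected reason → Spec_is_genuine_spelling_error_py original corrected reason (is_genuine_spelling_error_py original corrected reason)

-- ===== LEMMAS AND PROOFS =====

-- A's early-return loop is a negated 'any' over the suffix list
lemma pv_loopA_any (a b : List Char) (L : List (List Char)) :
    pvLoopA a b L = ! L.any (fun u => a ++ u == b || b ++ u == a) := by
  induction L with
  | nil => rfl
  | cons u rest ih =>
      simp only [pvLoopA, List.any_cons]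
      rcases h : (a ++ u == b || b ++ u == a)
      · simpa [h] using ih
      · simp

lemma pvCommonRest_left (a u : List Char) : pvCommonRest a (a ++ u) = some u := by
  induction a with
  | nil => cases u <;> rfl
  | cons x xs ih => simpa [pvCommonRest] using ih

lemma pvCommonRest_right (b u : List Char) : pvCommonRest (b ++ u) b = some u := by
  induction b with
  | nil => cases u <;> rfl
  | cons y ys ih => simpa [pvCommonRest] using ih

lemma pvCommonRest_sound (a : List Char) : ∀ b r, pvCommonRest a b = some r →
    a ++ r = b ∨ b ++ r = a := by
  induction a with
  | nil =>
      intro b r h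
      cases b <;> simp_all [pvCommonRest]
  | cons x xs ih =>
      intro b r h
      cases b with
      | nil =>
          simp [pvCommonRest] at h
          right; simp [← h]
      | cons y ys =>
          by_cases hxy : x = y
          · subst hxy
            simp [pvCommonRest] at h
            rcases ih ys r h with h' | h'
            · left; simp [h']
            · right; simp [h']
          · simp [pvCommonRest, hxy] at h

-- the suffix-existence test of A equals B's common-prefix remainder test
lemma pv_any_eq (a b : List Char) (S : List (List Char)) :
    S.any (fun u => a ++ u == b || b ++ u == a) =
    (match pvCommonRest a b with
     | none => false
     | some r => S.contains r) := by
  cases h : pvCommonRest a b with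
  | none =>
      simp only [List.any_eq_false, Bool.or_eq_true, beq_iff_eq, not_or]
      intro u _
      constructor
      · intro h1
        have hl := pvCommonRest_left a u
        rw [h1, h] at hl
        simp at hl
      · intro h2
        have hr := pvCommonRest_right b u
        rw [h2, h] at hr
        simp at hr
  | some r =>
      show (S.any fun u => a ++ u == b || b ++ u == a) = S.contains r
      rcases hc : S.contains r with _ | _
      · simp only [List.any_eq_false, Bool.or_eq_true, beq_iff_eq, not_or]
        intro u hu
        constructor
        · intro h1
          have hl := pvCommonRest_left a u
          rw [h1, h] at hl
          obtain rfl : r = u := by injection hl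
          simp [List.contains_eq_mem, hu] at hc
        · intro h2
          have hr := pvCommonRest_right b u
          rw [h2, h] at hr
          obtain rfl : r = u := by injection hr
          simp [List.contains_eq_mem, hu] at hc
      · simp only [List.any_eq_true, Bool.or_eq_true, beq_iff_eq]
        refine ⟨r, by simpa [List.contains_eq_mem] using hc, ?_⟩
        rcases pvCommonRest_sound a b r h with h' | h' <;> simp [h']

-- ===== VERDICT (by name: the statement is the Claim_ definition above) =====
theorem is_genuine_spelling_error_py_spec : Claim_equal_is_genuine_spelling_error_py := by
  intro original corrected reason _
  unfold Spec_is_genuine_spelling_error_py is_genuine_spelling_error_py is_genuine_spelling_error_py_alt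
  by_cases h0 : original == corrected
  · simp [h0]
  · simp only [h0, Bool.false_eq_true, if_false]
    set a := PySem.Chars.lower original.toList
    set b := PySem.Chars.lower corrected.toList
    by_cases hg : 3 < ((a.length : Int) - (b.length : Int)).natAbs
    · simp [hg]
    · simp only [hg, if_false]
      -- A's redundant '+s' check is subsumed by the loop's first iteration
      have hred : (if a ++ ['s'] == b || b ++ ['s'] == a then false
          else pvLoopA a b [['s'], ['e','d'], ['i','n','g'], ['e','r'], ['e','s','t']]) =
          pvLoopA a b [['s'], ['e','d'], ['i','n','g'], ['e','r'], ['e','s','t']] := by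
        rcases h : (a ++ ['s'] == b || b ++ ['s'] == a) with _ | _
        · simp
        · simp [pvLoopA, h]
      rw [hred, pv_loopA_any, pv_any_eq]
      cases pvCommonRest a b <;> simp
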